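-- pv_equiv track=rewrite | github.com/kevinren1108/leetcode | 0. OAtest/Shared Item.py | share
-- ===== SOURCE A (Python) =====
-- def share(categories, k):
--     res = 0
--     for i in range(1, len(categories)):
--         pS = set(categories[:i])
--         sS = set(categories[i:])
--         cnt = 0
--         for item in pS:
--             if item in sS:
--                 cnt += 1
--         if cnt > k:
--             res += 1
--     return res
-- ===== SOURCE B (Python) =====
-- def share(categories, k):
--     suffix = {}
--     for x in categories:
--         suffix[x] = suffix.get(x, 0) + 1
--     prefix = set()
--     shared = 0
--     res = 0
--     for x in categories[:-1]:
--         c = suffix.get(x, 0) - 1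
--         suffix[x] = c
--         if x in prefix:
--             if c == 0:
--                 shared -= 1
--         else:
--             prefix.add(x)
--             if c > 0:
--                 shared += 1
--         if shared > k:
--             res += 1
--     return res
-- ===== Notes on version B (the rewrite author's own statement) =====
-- stated objective: faster
-- what changed: Replaces the per-split rebuilding of both distinct-sets and the inner intersection scan with one left-to-right sweep that keeps a suffix multiset, a prefix set and the shared-distinct count, updating them in O(1) per split.
import Mathlib
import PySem

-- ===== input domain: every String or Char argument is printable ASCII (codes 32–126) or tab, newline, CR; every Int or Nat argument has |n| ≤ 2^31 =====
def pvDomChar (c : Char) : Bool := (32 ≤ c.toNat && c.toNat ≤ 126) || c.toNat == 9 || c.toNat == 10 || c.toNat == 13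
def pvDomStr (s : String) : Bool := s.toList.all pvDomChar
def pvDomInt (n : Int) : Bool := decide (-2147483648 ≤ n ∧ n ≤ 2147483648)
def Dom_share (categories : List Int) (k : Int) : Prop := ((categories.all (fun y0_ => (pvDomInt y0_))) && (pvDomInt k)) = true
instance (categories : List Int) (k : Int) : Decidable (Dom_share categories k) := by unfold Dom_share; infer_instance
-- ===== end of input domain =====

-- B replaces A's quadratic per-split set rebuilding with one O(n) sweep maintaining
-- prefix set / suffix counts / shared count (objective: faster, asymptotic).

-- ===== PORT A =====
def share (categories : List Int) (k : Int) : Int :=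
  (PySem.List.pyRange 1 (categories.length : Int)).foldl (fun res i =>
    let pS := PySem.Set.ofList (PySem.List.slice categories none (some i))
    let sS := PySem.Set.ofList (PySem.List.slice categories (some i) none)
    -- set iteration: the counting loop's result does not depend on iteration order
    let cnt := pS.foldl (fun cnt item => if sS.contains item then cnt + 1 else cnt) (0 : Int)
    if cnt > k then res + 1 else res) 0

-- ===== PORT B =====
def shareAltStep (k : Int) (st : PySem.Dict Int Int × PySem.Set Int × Int × Int) (x : Int) :
    PySem.Dict Int Int × PySem.Set Int × Int × Int :=
  let sfx := st.1
  let pfx := st.2.1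
  let shared := st.2.2.1
  let res := st.2.2.2
  let c := sfx.getD x 0 - 1
  let sfx := sfx.insert x c
  let ps : PySem.Set Int × Int :=
    if pfx.contains x then (pfx, if c = 0 then shared - 1 else shared)
    else (pfx.add x, if c > 0 then shared + 1 else shared)
  let res := if ps.2 > k then res + 1 else res
  (sfx, ps.1, ps.2, res)

def share_alt (categories : List Int) (k : Int) : Int :=
  let suffix0 : PySem.Dict Int Int :=
    categories.foldl (fun d x => d.insert x (d.getD x 0 + 1)) PySem.Dict.empty
  ((PySem.List.slice categories none (some (-1))).foldl (shareAltStep k)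
    (suffix0, PySem.Set.empty, 0, 0)).2.2.2

-- ===== PRECONDITION & SPEC =====
def Spec_share (categories : List Int) (k : Int) (out : Int) : Prop := out = share_alt categories k
instance (categories : List Int) (k : Int) (out : Int) : Decidable (Spec_share categories k out) := by unfold Spec_share; infer_instance

-- ===== CLAIM (what is proved, stated in full; the proofs are below) =====
def Claim_equal_share : Prop := ∀ (categories : List Int) (k : Int), Dom_share categories k → Spec_share categories k (share categories k)

-- ===== LEMMAS AND PROOFS =====

-- shared distinct count at split j: distinct items of the prefix that still occur in the suffix
def cntI (cats : List Int) (j : Nat) : Int :=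
  ((PySem.Set.ofList (cats.take j)).countP (fun x => decide (0 < (cats.drop j).count x)) : Int)

-- number of splits i ∈ [1, j] whose shared count exceeds k
def resSpec (cats : List Int) (k : Int) (j : Nat) : Int :=
  (((List.range' 1 j).countP (fun i => decide (k < cntI cats i))) : Int)

-- getD of B's insert-based counter-building fold
lemma counterD (xs : List Int) (d : PySem.Dict Int Int) (v : Int) :
    (xs.foldl (fun d x => d.insert x (d.getD x 0 + 1)) d).getD v 0
      = d.getD v 0 + (xs.count v : Int) := by
  induction xs generalizing d with
  | nil => simp
  | cons x xs ih =>
      rw [List.foldl_cons, ih, PySem.Dict.getD_insert]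
      by_cases h : v = x
      · subst h; simp; ring
      · simp [h, Ne.symm h]

lemma ofList_concat (l : List Int) (x : Int) :
    PySem.Set.ofList (l ++ [x]) = (PySem.Set.ofList l).add x := by
  simp [PySem.Set.ofList]

lemma contains_ofList (l : List Int) (x : Int) :
    (PySem.Set.ofList l).contains x = true ↔ x ∈ l := by
  simp [PySem.Set.mem_ofList]

-- appending the next element to the prefix set
lemma ofList_take_succ (cats : List Int) (j : Nat) (h : j < cats.length) :
    PySem.Set.ofList (cats.take (j+1)) =
      if cats[j] ∈ cats.take j then PySem.Set.ofList (cats.take j)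
      else PySem.Set.ofList (cats.take j) ++ [cats[j]] := by
  rw [List.take_succ_eq_append_getElem h, ofList_concat, PySem.Set.add]
  by_cases hmem : cats[j] ∈ cats.take j
  · rw [if_pos ((contains_ofList _ _).2 hmem), if_pos hmem]
  · have hf : (PySem.Set.ofList (cats.take j)).contains cats[j] = false := by
      cases hc2 : (PySem.Set.ofList (cats.take j)).contains cats[j]
      · rfl
      · exact absurd ((contains_ofList _ _).1 hc2) hmem
    rw [hf, if_neg hmem]
    simp

-- change of predicate at a single element of a nodup list, counted over the integers
lemma countP_swap (L : List Int) (x : Int) (p q : Int → Bool)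
    (hnd : L.Nodup) (hx : x ∈ L) (hagree : ∀ y ∈ L, y ≠ x → p y = q y) :
    (L.countP q : Int) = (L.countP p : Int)
      + (if q x then 1 else 0) - (if p x then 1 else 0) := by
  have hperm := List.perm_cons_erase (l := L) hx
  have he : (L.erase x).countP p = (L.erase x).countP q := by
    apply List.countP_congr
    intro y hy
    have hyx : y ≠ x := by
      intro h; subst h; exact (List.Nodup.not_mem_erase hnd) hy
    rw [hagree y (List.mem_of_mem_erase hy) hyx]
  have hq : L.countP q = (L.erase x).countP q + (if q x then 1 else 0) := by
    rw [hperm.countP_eq q, List.countP_cons]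
  have hp : L.countP p = (L.erase x).countP p + (if p x then 1 else 0) := by
    rw [hperm.countP_eq p, List.countP_cons]
  rw [hq, hp, he]
  cases p x <;> cases q x <;> push_cast <;> ring

lemma cntI_succ (cats : List Int) (j : Nat) (h : j < cats.length) :
    cntI cats (j+1) =
      if cats[j] ∈ cats.take j then
        cntI cats j + (if 0 < (cats.drop (j+1)).count cats[j] then 1 else 0) - 1
      else
        cntI cats j + (if 0 < (cats.drop (j+1)).count cats[j] then 1 else 0) := by
  have hdrop := List.drop_eq_getElem_cons h
  have hofl := ofList_take_succ cats j h
  set x := cats[j] with hxdef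
  by_cases hmem : x ∈ cats.take j
  · -- the new element was already in the prefix: the set is unchanged, only the
    -- predicate at x may flip (its suffix count drops by one, possibly to zero)
    rw [if_pos hmem] at hofl ⊢
    have hswap := countP_swap (PySem.Set.ofList (cats.take j)) x
      (fun y => decide (0 < (cats.drop j).count y))
      (fun y => decide (0 < (cats.drop (j+1)).count y))
      (PySem.Set.nodup_ofList _) ((PySem.Set.mem_ofList _ _).2 hmem)
      (by
        intro y _ hyx
        simp only [hdrop, List.count_cons]
        simp [Ne.symm hyx])
    have hpx : (0 < (cats.drop j).count x) := by
      rw [hdrop]; simp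
    simp only [cntI, hofl]
    rw [hswap]
    simp [hpx]
  · -- genuinely new prefix element: it is appended to the set, old entries keep
    -- their predicate values (their counts in the suffix are unchanged)
    rw [if_neg hmem] at hofl ⊢
    have hcongr : (PySem.Set.ofList (cats.take j)).countP
          (fun y => decide (0 < (cats.drop (j+1)).count y))
        = (PySem.Set.ofList (cats.take j)).countP
          (fun y => decide (0 < (cats.drop j).count y)) := by
      apply List.countP_congr
      intro y hy
      have hyx : y ≠ x := by
        intro hcon; subst hcon
        exact hmem ((PySem.Set.mem_ofList _ _).1 hy)
      simp only [hdrop, List.count_cons]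
      simp [Ne.symm hyx]
    simp only [cntI, hofl, List.countP_append, List.countP_cons, List.countP_nil, hcongr]
    by_cases hq : 0 < (cats.drop (j+1)).count x
    · simp [hq]
    · simp [hq]

lemma resSpec_succ (cats : List Int) (k : Int) (j : Nat) :
    resSpec cats k (j+1) = resSpec cats k j + (if k < cntI cats (j+1) then 1 else 0) := by
  simp only [resSpec, List.range'_1_concat, Nat.add_comm 1 j, List.countP_append,
    List.countP_cons, List.countP_nil]
  by_cases hc : k < cntI cats (j+1)
  · simp [hc]
  · simp [hc]

-- A's inner loop at split j computes cntI
lemma innerCnt (cats : List Int) (j : Nat) :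
    (PySem.Set.ofList (PySem.List.slice cats none (some (j:Int)))).foldl
      (fun cnt item =>
        if (PySem.Set.ofList (PySem.List.slice cats (some (j:Int)) none)).contains item
        then cnt + 1 else cnt) (0:Int) = cntI cats j := by
  rw [PySem.List.slice_to_natCast, PySem.List.slice_from_natCast,
    PySem.List.foldl_count_if]
  rw [List.countP_congr (q := fun y => decide (0 < (cats.drop j).count y))]
  · simp [cntI]
  · intro y _
    simp [List.count_pos_iff]

-- A's outer loop accumulates resSpec
lemma shareFold (cats : List Int) (k : Int) (m : Nat) (r : Int) :
    (PySem.List.pyRange 1 (m:Int)).foldl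
      (fun res i =>
        let pS := PySem.Set.ofList (PySem.List.slice cats none (some i))
        let sS := PySem.Set.ofList (PySem.List.slice cats (some i) none)
        let cnt := pS.foldl (fun cnt item => if sS.contains item then cnt + 1 else cnt) (0 : Int)
        if cnt > k then res + 1 else res) r
      = r + resSpec cats k (m - 1) := by
  induction m with
  | zero =>
      show (PySem.List.pyRange 1 0).foldl _ r = _
      simp [PySem.List.pyRange, resSpec]
  | succ t ih =>
      rcases Nat.eq_zero_or_pos t with ht | ht
      · subst ht
        show (PySem.List.pyRange 1 1).foldl _ r = _
        simp [PySem.List.pyRange, resSpec]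
      · have hcast : ((t + 1 : Nat) : Int) = (t : Int) + 1 := by push_cast; ring
        rw [hcast, PySem.List.pyRange_one_succ_right (by exact_mod_cast ht),
          List.foldl_append, ih]
        simp only [List.foldl_cons, List.foldl_nil, innerCnt]
        have ht1 : t - 1 + 1 = t := Nat.sub_add_cancel ht
        have hrs := resSpec_succ cats k (t - 1)
        rw [ht1] at hrs
        rw [Nat.add_sub_cancel, hrs]
        by_cases hc : k < cntI cats t
        · simp [hc]; ring
        · simp [hc]

-- B's loop invariant after j processed elements
def InvB (cats : List Int) (k : Int) (j : Nat)
    (st : PySem.Dict Int Int × PySem.Set Int × Int × Int) : Prop :=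
  (∀ v, st.1.getD v 0 = ((cats.drop j).count v : Int)) ∧
  st.2.1 = PySem.Set.ofList (cats.take j) ∧
  st.2.2.1 = cntI cats j ∧
  st.2.2.2 = resSpec cats k j

lemma stepB (cats : List Int) (k : Int) (j : Nat) (h : j < cats.length)
    (st : PySem.Dict Int Int × PySem.Set Int × Int × Int) (hI : InvB cats k j st) :
    InvB cats k (j+1) (shareAltStep k st cats[j]) := by
  obtain ⟨hd, hp, hs, hr⟩ := hI
  have hdrop := List.drop_eq_getElem_cons h
  have hcnt := cntI_succ cats j h
  have hofl := ofList_take_succ cats j h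
  set x := cats[j] with hxdef
  have hc : st.1.getD x 0 - 1 = ((cats.drop (j+1)).count x : Int) := by
    rw [hd x, hdrop]
    simp [List.count_cons_self]
  have hsuf : ∀ v, (shareAltStep k st x).1.getD v 0 = ((cats.drop (j+1)).count v : Int) := by
    intro v
    show (st.1.insert x (st.1.getD x 0 - 1)).getD v 0 = _
    rw [PySem.Dict.getD_insert]
    by_cases hv : v = x
    · rw [if_pos hv, hv]; exact hc
    · rw [if_neg hv, hd v, hdrop]
      simp [Ne.symm hv]
  by_cases hmem : x ∈ cats.take j
  · have hct : st.2.1.contains x = true := by rw [hp]; exact (contains_ofList _ _).2 hmem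
    have hps : shareAltStep k st x =
        (st.1.insert x (st.1.getD x 0 - 1),
         st.2.1,
         (if st.1.getD x 0 - 1 = 0 then st.2.2.1 - 1 else st.2.2.1),
         if (if st.1.getD x 0 - 1 = 0 then st.2.2.1 - 1 else st.2.2.1) > k
           then st.2.2.2 + 1 else st.2.2.2) := by
      simp only [shareAltStep, hct, if_true]
    have h3 : (if st.1.getD x 0 - 1 = 0 then st.2.2.1 - 1 else st.2.2.1)
        = cntI cats (j+1) := by
      rw [hc, hs, hcnt, if_pos hmem]
      split_ifs <;> omega
    refine ⟨hsuf, ?_, ?_, ?_⟩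
    · rw [hps]
      show st.2.1 = _
      rw [hp, hofl, if_pos hmem]
    · rw [hps]
      exact h3
    · rw [hps]
      show (if _ > k then st.2.2.2 + 1 else st.2.2.2) = _
      rw [h3, hr, resSpec_succ]
      split_ifs <;> omega
  · have hct : st.2.1.contains x = false := by
      cases hc2 : st.2.1.contains x
      · rfl
      · rw [hp] at hc2; exact absurd ((contains_ofList _ _).1 hc2) hmem
    have hct' : (PySem.Set.ofList (cats.take j)).contains x = false := by
      rw [← hp]; exact hct
    have hps : shareAltStep k st x =
        (st.1.insert x (st.1.getD x 0 - 1),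
         st.2.1.add x,
         (if st.1.getD x 0 - 1 > 0 then st.2.2.1 + 1 else st.2.2.1),
         if (if st.1.getD x 0 - 1 > 0 then st.2.2.1 + 1 else st.2.2.1) > k
           then st.2.2.2 + 1 else st.2.2.2) := by
      simp only [shareAltStep, hct, Bool.false_eq_true, if_false]
    have h3 : (if st.1.getD x 0 - 1 > 0 then st.2.2.1 + 1 else st.2.2.1)
        = cntI cats (j+1) := by
      rw [hc, hs, hcnt, if_neg hmem]
      split_ifs <;> omega
    refine ⟨hsuf, ?_, ?_, ?_⟩
    · rw [hps]
      show st.2.1.add x = _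
      rw [hp, hofl, if_neg hmem]
      simp [PySem.Set.add, hmem]
    · rw [hps]
      exact h3
    · rw [hps]
      show (if _ > k then st.2.2.2 + 1 else st.2.2.2) = _
      rw [h3, hr, resSpec_succ]
      split_ifs <;> omega

lemma foldB (cats : List Int) (k : Int) : ∀ (rest : List Int) (j : Nat)
    (st : PySem.Dict Int Int × PySem.Set Int × Int × Int),
    cats.dropLast.drop j = rest → InvB cats k j st →
    InvB cats k (j + rest.length) (rest.foldl (shareAltStep k) st) := by
  intro rest
  induction rest with
  | nil => intro j st _ hI; simpa using hI
  | cons x t ih =>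
      intro j st hdropj hI
      have hj : j < cats.dropLast.length := by
        by_contra hle
        rw [List.drop_eq_nil_of_le (le_of_not_gt hle)] at hdropj
        exact List.cons_ne_nil _ _ hdropj.symm
      have hjlen : j < cats.length := by
        have hl : cats.dropLast.length = cats.length - 1 := List.length_dropLast
        omega
      have h2 := List.drop_eq_getElem_cons hj
      rw [hdropj] at h2
      obtain ⟨h2a, h2b⟩ := List.cons_eq_cons.mp h2
      have hx : cats[j] = x := by rw [← List.getElem_dropLast hj, ← h2a]
      have hstep := stepB cats k j hjlen st hI
      rw [hx] at hstep
      have := ih (j+1) _ h2b.symm hstep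
      have hlen : (x :: t).length = t.length + 1 := rfl
      have harith : j + (x :: t).length = (j + 1) + t.length := by
        rw [hlen]; omega
      rw [harith, List.foldl_cons]
      exact this

theorem share_spec : Claim_equal_share := by
  intro cats k _
  show share cats k = share_alt cats k
  have hA : share cats k = resSpec cats k (cats.length - 1) := by
    unfold share
    rw [shareFold]
    ring
  have h0 : InvB cats k 0
      (cats.foldl (fun d x => d.insert x (d.getD x 0 + 1)) PySem.Dict.empty,
       PySem.Set.empty, 0, 0) := by
    refine ⟨?_, rfl, rfl, rfl⟩
    intro v
    rw [counterD]
    simp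
  have hB := foldB cats k cats.dropLast 0 _ rfl h0
  unfold share_alt
  rw [PySem.List.slice_to_neg_one]
  rw [hB.2.2.2, hA]
  simp [List.length_dropLast]
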